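-- pv_equiv track=rewrite | github.com/lijahong/Python_Algoritm | 소수의세제곱개수.py | solution
-- ===== SOURCE A (Python) =====
-- def alisto(b):
-- 	sosuright = [False,False] + [True] * (b - 1)
-- 	sosulist = list()
-- 	for i in range(2,b + 1):
-- 		if sosuright[i] == True:
-- 			sosulist.append(i)
-- 			for j in range(2*i,b+1,i):
-- 				sosuright[j] = False
-- 	return sosulist
--
-- def solution(a, b):
-- 	answer = 0
-- 	arr = alisto(b)
--
-- 	for i in arr:
-- 		if a<= i ** 2 <= b :
--
-- 			answer += 1
-- 		if a <= i ** 3 <= b: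
--
-- 			answer += 1
--
-- 	return answer
-- ===== SOURCE B (Python) =====
-- def solution(a, b):
--     # generate primes only up to isqrt(b) by trial division (all qualifying
--     # primes p satisfy p*p <= b), instead of sieving the whole range [2, b]
--     primes = []
--     i = 2
--     while i * i <= b:
--         if all(i % p for p in primes if p * p <= i):
--             primes.append(i)
--         i += 1
--     answer = 0
--     for p in primes:
--         if a <= p * p <= b:
--             answer += 1
--         if a <= p ** 3 <= b:
--             answer += 1
--     return answer
-- ===== Notes on version B (the rewrite author's own statement) =====
-- stated objective: faster
-- what changed: A sieves all of [2, b] with Eratosthenes and then tests each prime; B generates primes only up to isqrt(b) by trial division against the smaller primes (every prime whose square or cube lies in [a, b] satisfies p*p <= b), so the O(b) sieve array disappears.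
import Mathlib
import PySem

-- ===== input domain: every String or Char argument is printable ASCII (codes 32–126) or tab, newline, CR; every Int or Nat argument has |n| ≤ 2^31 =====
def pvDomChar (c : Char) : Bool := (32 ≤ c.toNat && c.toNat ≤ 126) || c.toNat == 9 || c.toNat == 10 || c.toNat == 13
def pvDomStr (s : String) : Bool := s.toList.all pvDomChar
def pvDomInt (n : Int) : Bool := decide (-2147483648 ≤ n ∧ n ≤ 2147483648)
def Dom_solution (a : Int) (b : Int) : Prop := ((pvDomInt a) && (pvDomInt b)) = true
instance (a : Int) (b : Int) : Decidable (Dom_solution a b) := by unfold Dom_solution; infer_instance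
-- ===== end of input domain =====

-- B replaces A's full Eratosthenes sieve over [2, b] by trial-division prime
-- generation only up to isqrt(b) (every counted prime p has p*p ≤ b); objective: faster.

-- ===== PORT A =====
-- inner loop 'for j in range(2*i, b+1, i): sosuright[j] = False'
-- (every index i, j used on sosuright lies in [2, b], inside the list of length
--  b+1 and nonnegative, so .set/.getD on j.toNat is exact here)
def sieveInner (b : Int) (i : Int) (m : List Bool) : List Bool :=
  (PySem.List.pyRange (2 * i) (b + 1) i).foldl (fun m j => m.set j.toNat false) m

-- body of the outer 'for i in range(2, b+1)' loop
def sieveLoop (b : Int) (st : List Bool × List Int) (i : Int) : List Bool × List Int :=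
  if st.1.getD i.toNat false = true then (sieveInner b i st.1, st.2 ++ [i]) else st

-- alisto(b)
def alistoP (b : Int) : List Int :=
  let sosuright : List Bool := [false, false] ++ List.replicate (b - 1).toNat true
  ((PySem.List.pyRange 2 (b + 1) 1).foldl (sieveLoop b) (sosuright, [])).2

def solution (a : Int) (b : Int) : Int :=
  let arr := alistoP b
  arr.foldl (fun answer i =>
    let answer := if a ≤ i ^ 2 ∧ i ^ 2 ≤ b then answer + 1 else answer
    if a ≤ i ^ 3 ∧ i ^ 3 ≤ b then answer + 1 else answer) 0

-- ===== PORT B =====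
-- termination of the 'while i * i <= b' loop: i stays ≤ b while the guard holds
theorem trial_measure_lt (b i : Int) (h : i * i ≤ b) :
    (b + 1 - (i + 1)).toNat < (b + 1 - i).toNat := by
  have h0 : 0 ≤ b := le_trans (mul_self_nonneg i) h
  have h2 : 2 * i ≤ b + 1 := by nlinarith [sq_nonneg (i - 1)]
  omega

-- 'while i * i <= b: if all(i % p for p in primes if p * p <= i): primes.append(i); i += 1'
def trialPrimes (b : Int) (i : Int) (primes : List Int) : List Int :=
  if h : i * i ≤ b then
    trialPrimes b (i + 1)
      (if (primes.filter (fun p => decide (p * p ≤ i))).all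
            (fun p => PySem.Int.mod i p != 0)
       then primes ++ [i] else primes)
  else primes
termination_by (b + 1 - i).toNat
decreasing_by exact trial_measure_lt b i h

def solution_alt (a : Int) (b : Int) : Int :=
  let primes := trialPrimes b 2 []
  primes.foldl (fun answer p =>
    let answer := if a ≤ p * p ∧ p * p ≤ b then answer + 1 else answer
    if a ≤ p ^ 3 ∧ p ^ 3 ≤ b then answer + 1 else answer) 0

-- ===== PRECONDITION & SPEC =====
def Spec_solution (a : Int) (b : Int) (out : Int) : Prop := out = solution_alt a b
instance (a : Int) (b : Int) (out : Int) : Decidable (Spec_solution a b out) := by unfold Spec_solution; infer_instance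

-- ===== CLAIM (what is proved, stated in full; the proofs are below) =====
def Claim_equal_solution : Prop := ∀ (a : Int) (b : Int), Dom_solution a b → Spec_solution a b (solution a b)

-- ===== LEMMAS AND PROOFS =====

-- the primes below n, in increasing order, as Nats and as Ints
def primesBelowL (n : Nat) : List Nat := (List.range n).filter (fun k => decide (Nat.Prime k))
def primesBelowI (n : Nat) : List Int := (primesBelowL n).map Int.ofNat

theorem primesBelowL_succ (n : Nat) :
    primesBelowL (n + 1) = primesBelowL n ++ (if Nat.Prime n then [n] else []) := by
  simp only [primesBelowL, List.range_succ, List.filter_append, List.filter_cons,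
    List.filter_nil]
  by_cases h : Nat.Prime n <;> simp [h]

theorem primesBelow_small (n : Nat) (h : n ≤ 2) : primesBelowL n = [] := by
  interval_cases n <;> decide

theorem prime_iff_lt (n : Nat) (h2 : 2 ≤ n) :
    ((∀ p : Nat, p < n → Nat.Prime p → p ∣ n → p = n) ↔ Nat.Prime n) := by
  constructor
  · intro h
    by_contra hnp
    obtain ⟨p, hp, hpd⟩ := Nat.exists_prime_and_dvd (by omega : n ≠ 1)
    have hple : p ≤ n := Nat.le_of_dvd (by omega) hpd
    rcases lt_or_eq_of_le hple with hlt | heq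
    · have := h p hlt hp hpd; omega
    · exact hnp (heq ▸ hp)
  · intro hn p hlt hp hpd
    rcases (Nat.Prime.eq_one_or_self_of_dvd hn p hpd) with h1 | h1
    · exact absurd h1 (Nat.Prime.ne_one hp)
    · exact h1

theorem prime_iff_sq (n : Nat) (h2 : 2 ≤ n) :
    ((∀ p : Nat, p < n → Nat.Prime p → p * p ≤ n → ¬ p ∣ n) ↔ Nat.Prime n) := by
  constructor
  · intro h
    by_contra hnp
    have hq := Nat.minFac_prime (by omega : n ≠ 1)
    have hqd := Nat.minFac_dvd n
    have hsq : n.minFac ^ 2 ≤ n := Nat.minFac_sq_le_self (by omega) hnp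
    have h2q : 2 ≤ n.minFac := hq.two_le
    have hlt : n.minFac < n := by nlinarith [hsq]
    exact h n.minFac hlt hq (by nlinarith [hsq]) hqd
  · intro hn p hlt hp _ hpd
    rcases (Nat.Prime.eq_one_or_self_of_dvd hn p hpd) with h1 | h1
    · exact absurd h1 hp.ne_one
    · omega

-- ---------- A side: correctness of the sieve ----------

def goodMarks (b : Int) (i : Nat) (m : List Bool) : Prop :=
  m.length = (b + 1).toNat ∧
  ∀ k : Nat, k < (b + 1).toNat →
    m.getD k false = decide (2 ≤ k ∧ ∀ p : Nat, p < i → Nat.Prime p → p ∣ k → p = k)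

theorem getD_set_false (m : List Bool) (n k : Nat) :
    (m.set n false).getD k false = (!(n == k) && m.getD k false) := by
  by_cases h : n = k
  · subst h
    by_cases hl : n < m.length
    · simp [List.getD_eq_getElem?_getD, hl]
    · rw [List.set_eq_of_length_le (by omega)]
      simp [List.getD_eq_getElem?_getD, List.getElem?_eq_none (by omega : m.length ≤ n)]
  · simp [List.getD_eq_getElem?_getD, List.getElem?_set_ne h, h]

theorem foldl_set_length (js : List Int) (m : List Bool) :
    (js.foldl (fun m j => m.set j.toNat false) m).length = m.length := by
  induction js generalizing m with
  | nil => rfl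
  | cons j t ih => simp [List.foldl_cons, ih]

theorem foldl_set_getD (js : List Int) (m : List Bool) (k : Nat) :
    (js.foldl (fun m j => m.set j.toNat false) m).getD k false =
      (!(js.any (fun j => j.toNat == k)) && m.getD k false) := by
  induction js generalizing m with
  | nil => simp
  | cons j t ih =>
    rw [List.foldl_cons, ih, getD_set_false]
    simp only [List.any_cons, Bool.not_or]
    cases (j.toNat == k) <;> cases t.any (fun j => j.toNat == k) <;> simp

theorem any_inner (b i : Int) (h2 : 2 ≤ i) (k : Nat) :
    (PySem.List.pyRange (2 * i) (b + 1) i).any (fun j => j.toNat == k) =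
      decide (i ∣ (k : Int) ∧ 2 * i ≤ (k : Int) ∧ (k : Int) ≤ b) := by
  by_cases hc : i ∣ (k : Int) ∧ 2 * i ≤ (k : Int) ∧ (k : Int) ≤ b
  · rw [decide_eq_true hc, List.any_eq_true]
    refine ⟨(k : Int), ?_, by simp⟩
    rw [PySem.List.mem_pyRange_iff_of_pos (by omega)]
    exact ⟨hc.2.1, by omega, dvd_sub hc.1 ⟨2, by ring⟩⟩
  · rw [decide_eq_false hc, List.any_eq_false]
    intro j hj
    rw [PySem.List.mem_pyRange_iff_of_pos (by omega)] at hj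
    obtain ⟨hj1, hj2, hj3⟩ := hj
    simp only [beq_iff_eq]
    intro hbeq
    have hjk : j = (k : Int) := by omega
    subst hjk
    have hdvd : i ∣ (k : Int) := by
      have h2i : i ∣ 2 * i := ⟨2, by ring⟩
      have := dvd_add hj3 h2i
      simpa using this
    exact hc ⟨hdvd, hj1, by omega⟩

theorem sieve_step (b i : Int) (h2 : 2 ≤ i) (hib : i ≤ b) (m : List Bool) (l : List Int)
    (hm : goodMarks b i.toNat m) (hl : l = primesBelowI i.toNat) :
    goodMarks b (i.toNat + 1) (sieveLoop b (m, l) i).1 ∧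
      (sieveLoop b (m, l) i).2 = primesBelowI (i.toNat + 1) := by
  have hn2 : 2 ≤ i.toNat := by omega
  have hnk : i.toNat < (b + 1).toNat := by omega
  have hcast : ((i.toNat : Int)) = i := Int.toNat_of_nonneg (by omega)
  have hm2 := hm.2 i.toNat hnk
  have hprim : (m.getD i.toNat false = true) ↔ Nat.Prime i.toNat := by
    rw [hm2, decide_eq_true_eq]
    constructor
    · rintro ⟨_, h⟩; exact (prime_iff_lt i.toNat hn2).1 h
    · intro hp; exact ⟨hp.two_le, (prime_iff_lt i.toNat hn2).2 hp⟩
  unfold sieveLoop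
  by_cases hp : Nat.Prime i.toNat
  · rw [if_pos (hprim.2 hp)]
    refine ⟨⟨?_, ?_⟩, ?_⟩
    · simpa [sieveInner, foldl_set_length] using hm.1
    · intro k hk
      have hkb : (k : Int) ≤ b := by omega
      unfold sieveInner
      rw [foldl_set_getD, any_inner b i h2 k, hm.2 k hk, ← decide_not, Bool.and_comm,
        ← Bool.decide_and, decide_eq_decide]
      constructor
      · rintro ⟨⟨hk2, hall⟩, hnd⟩
        refine ⟨hk2, ?_⟩
        intro p hp' hpp hpd
        rcases Nat.lt_succ_iff_lt_or_eq.1 hp' with hlt | rfl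
        · exact hall p hlt hpp hpd
        · by_contra hne
          obtain ⟨t, rfl⟩ := hpd
          exfalso
          apply hnd
          have ht2 : 2 ≤ t := by
            rcases Nat.lt_or_ge t 2 with h | h
            · interval_cases t <;> omega
            · exact h
          refine ⟨?_, ?_, hkb⟩
          · rw [← hcast]; exact_mod_cast Dvd.intro t rfl
          · rw [← hcast]
            have : 2 * i.toNat ≤ i.toNat * t := by nlinarith
            exact_mod_cast this
      · rintro ⟨hk2, hall⟩
        refine ⟨⟨hk2, fun p hp' hpp hpd => hall p (by omega) hpp hpd⟩, ?_⟩
        rintro ⟨hdvd, hge, _⟩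
        have hnd : i.toNat ∣ k := by
          rw [← hcast] at hdvd; exact_mod_cast hdvd
        have := hall i.toNat (Nat.lt_succ_self _) hp hnd
        rw [← this, hcast] at hge
        omega
    · simp only [hl, primesBelowI, primesBelowL_succ, if_pos hp, List.map_append]
      simp [hcast]
  · rw [if_neg (fun hh => hp (hprim.1 hh))]
    refine ⟨⟨hm.1, ?_⟩, ?_⟩
    · intro k hk
      rw [hm.2 k hk, decide_eq_decide]
      refine and_congr_right fun hk2 => ?_
      constructor
      · intro hall p hp' hpp hpd
        rcases Nat.lt_succ_iff_lt_or_eq.1 hp' with hlt | rfl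
        · exact hall p hlt hpp hpd
        · exact absurd hpp hp
      · intro hall p hp' hpp hpd
        exact hall p (by omega) hpp hpd
    · simp [hl, primesBelowI, primesBelowL_succ, if_neg hp]

theorem sieve_fold (b : Int) (hb : 2 ≤ b) :
    ∀ (fuel : Nat) (i : Int), (b + 1 - i).toNat = fuel → 2 ≤ i → i ≤ b + 1 →
    ∀ (m : List Bool) (l : List Int), goodMarks b i.toNat m → l = primesBelowI i.toNat →
    ((PySem.List.pyRange i (b + 1) 1).foldl (sieveLoop b) (m, l)).2 =
      primesBelowI (b + 1).toNat := by
  intro fuel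
  induction fuel with
  | zero =>
    intro i hf h2 hib m l hm hl
    have : i = b + 1 := by omega
    subst this
    rw [PySem.List.pyRange_one_eq_nil (le_refl _)]
    simpa using hl
  | succ n ih =>
    intro i hf h2 hib m l hm hl
    have hib' : i < b + 1 := by omega
    rw [PySem.List.pyRange_one_cons hib', List.foldl_cons]
    obtain ⟨hm', hl'⟩ := sieve_step b i h2 (by omega) m l hm hl
    have hpair : sieveLoop b (m, l) i =
        ((sieveLoop b (m, l) i).1, (sieveLoop b (m, l) i).2) := rfl
    rw [hpair, hl']
    have htn : (i + 1).toNat = i.toNat + 1 := by omega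
    exact ih (i + 1) (by omega) (by omega) (by omega) _ _ (htn ▸ hm') (by rw [htn])

theorem alisto_eq (b : Int) : alistoP b = primesBelowI (b + 1).toNat := by
  by_cases hb : 2 ≤ b
  · unfold alistoP
    apply sieve_fold b hb (b + 1 - 2).toNat 2 rfl (le_refl _) (by omega)
    · constructor
      · simp only [List.length_append, List.length_replicate, List.length_cons,
          List.length_nil]
        omega
      · intro k hk
        match k with
        | 0 => simp
        | 1 => simp
        | (k + 2) =>
          have hk2 : k < (b - 1).toNat := by omega
          have hgd : ([false, false] ++ List.replicate (b - 1).toNat true).getD (k + 2) false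
              = true := by
            simpa using List.getD_replicate true hk2 (y := false)
          rw [hgd]
          have hcond : (2 ≤ k + 2 ∧ ∀ p : Nat, p < (2 : Int).toNat → Nat.Prime p →
              p ∣ (k + 2) → p = k + 2) := by
            refine ⟨by omega, ?_⟩
            intro p hp hpp _
            have := hpp.two_le
            omega
          exact (decide_eq_true hcond).symm
    · simp [primesBelowI, primesBelow_small 2 (le_refl _)]
  · unfold alistoP
    rw [PySem.List.pyRange_one_eq_nil (by omega)]
    simp [primesBelowI, primesBelow_small (b + 1).toNat (by omega)]

-- ---------- B side: correctness of trial division ----------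

theorem sqrt_lt_of_not_sq_le (b i : Int) (h2 : 2 ≤ i) (h : ¬ i * i ≤ b) :
    Nat.sqrt b.toNat < i.toNat := by
  rw [Nat.sqrt_lt']
  by_cases hb : 0 ≤ b
  · zify
    rw [Int.toNat_of_nonneg hb, Int.toNat_of_nonneg (by omega)]
    nlinarith
  · have hb0 : b.toNat = 0 := by omega
    have h4 : 2 ≤ i.toNat := by omega
    rw [hb0]
    nlinarith

theorem le_sqrt_of_sq_le (b i : Int) (h2 : 2 ≤ i) (h : i * i ≤ b) :
    i.toNat ≤ Nat.sqrt b.toNat := by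
  rw [Nat.le_sqrt]
  have hb : 0 ≤ b := le_trans (mul_self_nonneg i) h
  zify
  rw [Int.toNat_of_nonneg hb, Int.toNat_of_nonneg (by omega)]
  exact h

theorem trial_cond (b i : Int) (h2 : 2 ≤ i) :
    (((primesBelowI i.toNat).filter (fun p => decide (p * p ≤ i))).all
        (fun p => PySem.Int.mod i p != 0) = true) ↔ Nat.Prime i.toNat := by
  have hcast : ((i.toNat : Int)) = i := Int.toNat_of_nonneg (by omega)
  rw [← prime_iff_sq i.toNat (by omega)]
  simp only [List.all_eq_true, List.mem_filter, primesBelowI, List.mem_map,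
    primesBelowL, List.mem_filter, List.mem_range, bne_iff_ne, ne_eq,
    Int.ofNat_eq_natCast, decide_eq_true_eq]
  constructor
  · intro h p hlt hpp hsq hpd
    have := h (p : Int) ⟨⟨p, ⟨hlt, by simpa using hpp⟩, rfl⟩, by
      rw [← hcast]; exact_mod_cast hsq⟩
    apply this
    rw [PySem.Int.mod_eq_zero_iff_dvd, ← hcast]
    exact_mod_cast hpd
  · rintro h p ⟨⟨q, ⟨hlt, hqp⟩, rfl⟩, hsq⟩ hmod
    rw [PySem.Int.mod_eq_zero_iff_dvd] at hmod
    refine h q hlt (by simpa using hqp) ?_ ?_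
    · rw [← hcast] at hsq; exact_mod_cast hsq
    · rw [← hcast] at hmod; exact_mod_cast hmod

theorem trialPrimes_eq (b : Int) : ∀ (fuel : Nat) (i : Int), (b + 1 - i).toNat = fuel →
    2 ≤ i → trialPrimes b i (primesBelowI i.toNat) =
      primesBelowI (max i.toNat (Nat.sqrt b.toNat + 1)) := by
  intro fuel
  induction fuel with
  | zero =>
    intro i hf h2
    have hnot : ¬ i * i ≤ b := by
      intro h
      have h0 : 0 ≤ b := le_trans (mul_self_nonneg i) h
      have := trial_measure_lt b i h
      omega
    rw [trialPrimes, dif_neg hnot]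
    have := sqrt_lt_of_not_sq_le b i h2 hnot
    rw [max_eq_left (by omega)]
  | succ n ih =>
    intro i hf h2
    by_cases hg : i * i ≤ b
    · rw [trialPrimes, dif_pos hg]
      have hb0 : 0 ≤ b := le_trans (mul_self_nonneg i) hg
      have hle : i.toNat ≤ Nat.sqrt b.toNat := le_sqrt_of_sq_le b i h2 hg
      have hcast : ((i.toNat : Int)) = i := Int.toNat_of_nonneg (by omega)
      have htn : (i + 1).toNat = i.toNat + 1 := by omega
      have hnext : (if (List.filter (fun p => decide (p * p ≤ i)) (primesBelowI i.toNat)).all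
            (fun p => PySem.Int.mod i p != 0) then primesBelowI i.toNat ++ [i]
          else primesBelowI i.toNat) = primesBelowI (i.toNat + 1) := by
        by_cases hp : Nat.Prime i.toNat
        · rw [if_pos ((trial_cond b i h2).2 hp)]
          simp only [primesBelowI, primesBelowL_succ, if_pos hp, List.map_append]
          simp [hcast]
        · rw [if_neg (fun hh => hp ((trial_cond b i h2).1 hh))]
          simp [primesBelowI, primesBelowL_succ, if_neg hp]
      rw [hnext, ← htn]
      rw [ih (i + 1) (by have := trial_measure_lt b i hg; omega) (by omega)]
      congr 1
      omega
    · rw [trialPrimes, dif_neg hg]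
      have := sqrt_lt_of_not_sq_le b i h2 hg
      rw [max_eq_left (by omega)]

-- ---------- counting ----------

theorem sum_primes_drop (N M : Nat) (hMN : M ≤ N) (f : Nat → Int)
    (hf : ∀ q : Nat, Nat.Prime q → M ≤ q → f q = 0) :
    ((primesBelowL N).map f).sum = ((primesBelowL M).map f).sum := by
  obtain ⟨d, rfl⟩ := Nat.exists_eq_add_of_le hMN
  simp only [primesBelowL, List.range_add, List.filter_append, List.map_append,
    List.sum_append]
  have hz : ((List.filter (fun k => decide (Nat.Prime k))
      ((List.range d).map (fun x => M + x))).map f).sum = 0 := by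
    apply List.sum_eq_zero
    intro x hx
    simp only [List.mem_map, List.mem_filter] at hx
    obtain ⟨q, ⟨⟨t, ht, rfl⟩, hq2⟩, rfl⟩ := hx
    exact hf _ (by simpa using hq2) (by omega)
  rw [hz, add_zero]

theorem fold_count_eq_sum (a b : Int) (l : List Int) :
    (l.foldl (fun answer i =>
        let answer := if a ≤ i ^ 2 ∧ i ^ 2 ≤ b then answer + 1 else answer
        if a ≤ i ^ 3 ∧ i ^ 3 ≤ b then answer + 1 else answer) 0) =
      (l.map (fun i => (if a ≤ i * i ∧ i * i ≤ b then (1 : Int) else 0) +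
        (if a ≤ i * i * i ∧ i * i * i ≤ b then 1 else 0))).sum := by
  rw [PySem.List.foldl_congr_mem l _
    (fun answer i => answer + ((if a ≤ i * i ∧ i * i ≤ b then (1 : Int) else 0) +
      (if a ≤ i * i * i ∧ i * i * i ≤ b then 1 else 0))) 0 ?_]
  · rw [PySem.List.foldl_add]; simp
  · intro acc x _
    have h2 : x ^ 2 = x * x := by ring
    have h3 : x ^ 3 = x * x * x := by ring
    simp only [h2, h3]
    split_ifs <;> ring

theorem fold_count_eq_sum' (a b : Int) (l : List Int) :
    (l.foldl (fun answer p =>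
        let answer := if a ≤ p * p ∧ p * p ≤ b then answer + 1 else answer
        if a ≤ p ^ 3 ∧ p ^ 3 ≤ b then answer + 1 else answer) 0) =
      (l.map (fun i => (if a ≤ i * i ∧ i * i ≤ b then (1 : Int) else 0) +
        (if a ≤ i * i * i ∧ i * i * i ≤ b then 1 else 0))).sum := by
  rw [PySem.List.foldl_congr_mem l _
    (fun answer i => answer + ((if a ≤ i * i ∧ i * i ≤ b then (1 : Int) else 0) +
      (if a ≤ i * i * i ∧ i * i * i ≤ b then 1 else 0))) 0 ?_]
  · rw [PySem.List.foldl_add]; simp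
  · intro acc x _
    have h3 : x ^ 3 = x * x * x := by ring
    simp only [h3]
    split_ifs <;> ring

-- ===== VERDICT (by name: the statement is the Claim_ definition above) =====
theorem solution_spec : Claim_equal_solution := by
  intro a b _
  unfold Spec_solution
  show solution a b = solution_alt a b
  have hstart : ([] : List Int) = primesBelowI (2 : Int).toNat := by
    simp [primesBelowI, primesBelow_small 2 (le_refl _)]
  simp only [solution, solution_alt]
  rw [fold_count_eq_sum, fold_count_eq_sum', alisto_eq, hstart,
    trialPrimes_eq b (b + 1 - 2).toNat 2 rfl (le_refl _)]
  simp only [primesBelowI, List.map_map]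
  set g : Nat → Int := (fun i => (if a ≤ i * i ∧ i * i ≤ b then (1 : Int) else 0) +
    (if a ≤ i * i * i ∧ i * i * i ≤ b then 1 else 0)) ∘ Int.ofNat with hg
  by_cases hb : 1 ≤ b
  · have hs : Nat.sqrt b.toNat ≤ b.toNat := Nat.sqrt_le_self _
    have hMN : max (2 : Int).toNat (Nat.sqrt b.toNat + 1) ≤ (b + 1).toNat := by omega
    rw [sum_primes_drop (b + 1).toNat _ hMN g ?_]
    intro q hq hMq
    have hsq : Nat.sqrt b.toNat < q := by omega
    have hq2 : 2 ≤ q := hq.two_le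
    have hbq : (b : Int) < (q : Int) * (q : Int) := by
      rw [Nat.sqrt_lt'] at hsq
      have h1 : (b.toNat : Int) < ((q ^ 2 : Nat) : Int) := by exact_mod_cast hsq
      push_cast at h1
      nlinarith [Int.self_le_toNat b]
    have hq1 : (1 : Int) ≤ (q : Int) := by exact_mod_cast Nat.one_le_iff_ne_zero.mpr (by omega)
    have hbq3 : (b : Int) < (q : Int) * (q : Int) * (q : Int) := by nlinarith
    simp only [hg, Function.comp_apply, Int.ofNat_eq_natCast]
    rw [if_neg (fun hcc => absurd hcc.2 (not_le.mpr hbq)),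
      if_neg (fun hcc => absurd hcc.2 (not_le.mpr hbq3))]
    simp
  · have h1 : (b + 1).toNat ≤ 2 := by omega
    have h2 : b.toNat = 0 := by omega
    rw [primesBelow_small _ h1, h2]
    norm_num [primesBelow_small]
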